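-- pv_equiv track=rewrite | github.com/ddraa/Algorithm | kp/p3.py | solution
-- ===== SOURCE A (Python) =====
-- def solution(line1, line2):
--     answer = line1.count(line2)
--     c = 1
--     while True:
--         string = ""
--         for i, s in enumerate(line2):
--             string += s
--             if i == len(line2) - 1:
--                 break
--             string += '_' * c
--
--         if len(string) > len(line1):
--             break
--
--         for si in range(len(line1) - len(string) + 1):
--             k, res = 0, 0
--
--             while si + k < len(line1) and k < len(string):
--                 if string[k] == line1[si + k]:
--                     res += 1
--                     if res == len(line2):
--                         answer += 1
--                         break
--                 k += c + 1
--         c += 1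
--     return answer
-- ===== SOURCE B (Python) =====
-- def solution(line1, line2):
--     n, m = len(line1), len(line2)
--     answer = line1.count(line2)
--     if m >= 2:
--         d = 2
--         while (m - 1) * d + 1 <= n:
--             for r in range(d):
--                 t = line1[r::d]
--                 i = t.find(line2)
--                 while i != -1:
--                     answer += 1
--                     i = t.find(line2, i + 1)
--             d += 1
--     return answer
-- ===== Notes on version B (the rewrite author's own statement) =====
-- stated objective: faster
-- what changed: B replaces A's per-(start,gap) underscore-padded pattern scan by a residue-class decomposition: for each gap d it slices line1 into the d strings line1[r::d] and counts overlapping occurrences of line2 in each with C-level str.find, turning strided matching into contiguous substring search; Pre_ excludes the inputs (len(line2) <= 1 with non-empty line1, or len(line2) == 0) on which A loops forever.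
import Mathlib
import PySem

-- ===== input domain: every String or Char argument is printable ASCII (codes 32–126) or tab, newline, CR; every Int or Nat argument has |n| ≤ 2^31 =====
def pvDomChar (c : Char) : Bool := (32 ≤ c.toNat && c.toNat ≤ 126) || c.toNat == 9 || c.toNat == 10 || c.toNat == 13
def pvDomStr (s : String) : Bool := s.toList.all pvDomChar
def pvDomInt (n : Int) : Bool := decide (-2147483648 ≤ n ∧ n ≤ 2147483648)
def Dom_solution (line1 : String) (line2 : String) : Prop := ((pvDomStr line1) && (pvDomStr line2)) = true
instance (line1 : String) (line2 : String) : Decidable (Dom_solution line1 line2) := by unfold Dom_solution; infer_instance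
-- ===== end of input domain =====

-- B replaces A's per-(start,gap) scan over an underscore-padded pattern by a residue-class
-- decomposition: per gap d it slices line1 into the d strings line1[r::d] and counts
-- overlapping occurrences of line2 in each with str.find (objective: faster, measured).

-- ===== PORT A =====
-- the "string" built from line2 with c underscores after every char but the last
-- (Python appends s, breaks at the last index, else appends '_' * c)
def buildA (c : Nat) : List Char → List Char
  | [] => []
  | [s] => [s]
  | s :: t :: r => s :: (List.replicate c '_' ++ buildA c (t :: r))

-- the inner 'while si + k < len(line1) and k < len(string)' loop; returns the 1 added to
-- answer on the 'res == len(line2)' break, else 0.  Indices are in range whenever read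
-- (the loop condition guarantees it), so List.getD is exact here.
def innerA (l1 str : List Char) (m si c : Nat) (k res : Nat) : Int :=
  if h : si + k < l1.length ∧ k < str.length then
    if str.getD k ' ' = l1.getD (si + k) ' ' then
      if res + 1 = m then 1
      else innerA l1 str m si c (k + (c + 1)) (res + 1)
    else innerA l1 str m si c (k + (c + 1)) res
  else 0
termination_by str.length - k
decreasing_by all_goals omega

-- the 'while True' loop over c, threading answer; fuel only makes it total (the Python
-- diverges when len(line2) ≤ 1 — excluded by Pre_; inside Pre_ the fuel is never exhausted)
def loopA (l1 l2 : List Char) : Nat → Nat → Int → Int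
  | _, 0, acc => acc
  | c, fuel + 1, acc =>
    if (buildA c l2).length > l1.length then acc
    else loopA l1 l2 (c + 1) fuel
      ((List.range (l1.length - (buildA c l2).length + 1)).foldl
        (fun a si => a + innerA l1 (buildA c l2) l2.length si c 0 0) acc)

def solution (line1 : String) (line2 : String) : Int :=
  loopA line1.toList line2.toList 1 (line1.toList.length + 2)
    (PySem.Str.count line1 line2 : Int)

-- ===== PORT B =====
-- 'i = t.find(line2); while i != -1: answer += 1; i = t.find(line2, i + 1)':
-- count of overlapping occurrences of p in t; fuel t.length + 1 only makes it total
-- (each found index is strictly larger than the previous one)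
def findLoopB (t p : List Char) : Nat → Int → Int → Int
  | 0, _, acc => acc
  | fuel + 1, i, acc =>
    if i = -1 then acc
    else findLoopB t p fuel (PySem.Chars.findFrom t p (i + 1)) (acc + 1)

-- t = line1[r::d]; the step d is never 0 where this is called, so slice? is never none
def resB (l1 : List Char) (r d : Nat) : List Char :=
  (PySem.List.slice? l1 (some (r : Int)) none (d : Int)).getD []

-- 'for r in range(d): t = line1[r::d]; <find loop>'
def rowB (l1 l2 : List Char) (d : Nat) (acc : Int) : Int :=
  (List.range d).foldl (fun a r =>
    findLoopB (resB l1 r d) l2 ((resB l1 r d).length + 1)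
      (PySem.Chars.find (resB l1 r d) l2) a) acc

-- 'while (m - 1) * d + 1 <= n' loop over the gap d; fuel only makes it total (the Python
-- diverges when len(line2) ≤ 1 with line1 non-empty — excluded by Pre_)
def loopB (l1 l2 : List Char) : Nat → Nat → Int → Int
  | _, 0, acc => acc
  | d, fuel + 1, acc =>
    if (l2.length - 1) * d + 1 ≤ l1.length then
      loopB l1 l2 (d + 1) fuel (rowB l1 l2 d acc)
    else acc

def solution_alt (line1 : String) (line2 : String) : Int :=
  if 2 ≤ line2.toList.length then
    loopB line1.toList line2.toList 2 (line1.toList.length + 2)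
      (PySem.Str.count line1 line2 : Int)
  else (PySem.Str.count line1 line2 : Int)

-- ===== PRECONDITION & SPEC =====
-- Pre_ excludes exactly the inputs where A never returns: A's outer while-loop runs forever
-- when len(line2) == 0, and when len(line2) == 1 with line1 non-empty (the built pattern
-- never outgrows line1).  On every other input A returns normally.
def Pre_solution (line1 : String) (line2 : String) : Prop :=
  2 ≤ line2.toList.length ∨ (line2.toList.length = 1 ∧ line1.toList.length = 0)
instance (line1 : String) (line2 : String) : Decidable (Pre_solution line1 line2) := by
  unfold Pre_solution; infer_instance

def pvWitness_solution : String × String := ("abab", "ab")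

def Spec_solution (line1 : String) (line2 : String) (out : Int) : Prop := out = solution_alt line1 line2
instance (line1 : String) (line2 : String) (out : Int) : Decidable (Spec_solution line1 line2 out) := by unfold Spec_solution; infer_instance

-- ===== CLAIM (what is proved, stated in full; the proofs are below) =====
def Claim_equal_solution : Prop := ∀ (line1 : String) (line2 : String), Dom_solution line1 line2 → Pre_solution line1 line2 → Spec_solution line1 line2 (solution line1 line2)

-- ===== LEMMAS AND PROOFS =====

-- the evenly-spaced match test at start si with gap d (shared characterisation)
def chkB (l1 l2 : List Char) (si d : Nat) : Bool :=
  (List.range l2.length).all (fun j => l1.getD (si + j * d) ' ' == l2.getD j ' ')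

-- the per-pair 0/1 contribution, guarded by the bound that both loops respect
def gIf (l1 l2 : List Char) (si d : Nat) : Int :=
  if si + (l2.length - 1) * d < l1.length then (if chkB l1 l2 si d then 1 else 0) else 0

lemma length_buildA (c : Nat) (l2 : List Char) (h : l2 ≠ []) :
    (buildA c l2).length = (l2.length - 1) * (c + 1) + 1 := by
  induction l2 with
  | nil => simp at h
  | cons s t ih =>
    cases t with
    | nil => simp [buildA]
    | cons a r =>
      simp only [buildA, List.length_cons, List.length_append, List.length_replicate,
        ih (by simp)]
      simp only [Nat.add_sub_cancel]
      rw [Nat.add_mul]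
      omega

lemma getD_buildA (c : Nat) (l2 : List Char) (j : Nat) (hj : j < l2.length) (x : Char) :
    (buildA c l2).getD (j * (c + 1)) x = l2.getD j x := by
  induction l2 generalizing j with
  | nil => simp at hj
  | cons s t ih =>
    cases t with
    | nil =>
      cases j with
      | zero => simp [buildA]
      | succ j' => simp at hj
    | cons a r =>
      cases j with
      | zero => simp [buildA]
      | succ j' =>
        have h1 : (j' + 1) * (c + 1) = (c + j' * (c + 1)) + 1 := by ring
        rw [h1]
        simp only [buildA, List.getD, List.getElem?_cons_succ]
        rw [show c + j' * (c + 1) = (List.replicate c '_').length + j' * (c + 1) by simp]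
        rw [List.getElem?_append_right (by omega)]
        simp only [List.length_replicate, Nat.add_sub_cancel_left]
        have := ih j' (by simpa using hj)
        simpa [List.getD] using this

lemma innerA_eq (l1 l2 : List Char) (si c : Nat) (hm : 2 ≤ l2.length)
    (hsi : si + (buildA c l2).length ≤ l1.length) (j res : Nat)
    (hj : j ≤ l2.length) (hres : res ≤ j) (hres2 : res < l2.length) :
    innerA l1 (buildA c l2) l2.length si c (j * (c + 1)) res =
      if res + (List.range' j (l2.length - j)).countP
          (fun j' => (buildA c l2).getD (j' * (c + 1)) ' ' = l1.getD (si + j' * (c + 1)) ' ')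
        = l2.length then 1 else 0 := by
  have hne : l2 ≠ [] := by intro h; rw [h] at hm; simp at hm
  have hlen : (buildA c l2).length = (l2.length - 1) * (c + 1) + 1 := length_buildA c l2 hne
  have hmul : (l2.length - 1) * (c + 1) + (c + 1) = l2.length * (c + 1) := by
    have h1 := Nat.succ_mul (l2.length - 1) (c + 1)
    have h2 : (l2.length - 1).succ = l2.length := by omega
    rw [h2] at h1; omega
  generalize hN : l2.length - j = N
  induction N generalizing j res with
  | zero =>
    have hjm : j = l2.length := by omega
    rw [innerA]
    have hk : ¬ (si + j * (c + 1) < l1.length ∧ j * (c + 1) < (buildA c l2).length) := by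
      rw [hlen, hjm]; omega
    rw [dif_neg hk]
    simp only [List.range'_zero, List.countP_nil, Nat.add_zero]
    rw [if_neg (by omega)]
  | succ N ih =>
    have hjm : j < l2.length := by omega
    have hjd : j * (c + 1) < (buildA c l2).length := by
      rw [hlen]
      have := Nat.mul_le_mul_right (c + 1) (show j ≤ l2.length - 1 by omega)
      omega
    rw [innerA, dif_pos ⟨by omega, hjd⟩, List.range'_succ]
    by_cases hp : (buildA c l2).getD (j * (c + 1)) ' ' = l1.getD (si + j * (c + 1)) ' '
    · rw [if_pos hp]
      simp only [List.countP_cons, hp, decide_true, if_true]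
      by_cases hb : res + 1 = l2.length
      · rw [if_pos hb]
        have hN0 : N = 0 := by omega
        rw [hN0]
        simp only [List.range'_zero, List.countP_nil]
        rw [if_pos (by omega)]
      · rw [if_neg hb]
        rw [show j * (c + 1) + (c + 1) = (j + 1) * (c + 1) by ring]
        rw [ih (j + 1) (res + 1) (by omega) (by omega) (by omega) (by omega)]
        exact if_congr (by omega) rfl rfl
    · rw [if_neg hp]
      simp only [List.countP_cons, hp, decide_false]
      rw [show j * (c + 1) + (c + 1) = (j + 1) * (c + 1) by ring]
      rw [ih (j + 1) res (by omega) (by omega) (by omega) (by omega)]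
      simp

lemma innerA_chk (l1 l2 : List Char) (si c : Nat) (hm : 2 ≤ l2.length)
    (hsi : si + (buildA c l2).length ≤ l1.length) :
    innerA l1 (buildA c l2) l2.length si c 0 0 =
      if chkB l1 l2 si (c + 1) then 1 else 0 := by
  have h0 := innerA_eq l1 l2 si c hm hsi 0 0 (by omega) (le_refl 0) (by omega)
  simp only [Nat.zero_mul, Nat.zero_add, Nat.sub_zero] at h0
  rw [h0]
  refine if_congr ?_ rfl rfl
  rw [← List.range_eq_range']
  unfold chkB
  constructor
  · intro hcnt
    rw [List.all_eq_true]
    intro j hjm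
    rw [List.mem_range] at hjm
    have hall := List.countP_eq_length.mp (by rw [hcnt, List.length_range])
    have hj := hall j (List.mem_range.mpr hjm)
    simp only [decide_eq_true_eq] at hj
    rw [getD_buildA c l2 j hjm] at hj
    rw [beq_iff_eq]
    exact hj.symm
  · intro hall
    have hall' : ∀ a ∈ List.range l2.length,
        (fun j' => decide ((buildA c l2).getD (j' * (c + 1)) ' ' = l1.getD (si + j' * (c + 1)) ' ')) a = true := by
      intro j hjm
      rw [List.mem_range] at hjm
      have hj := List.all_eq_true.mp hall j (List.mem_range.mpr hjm)
      simp only [beq_iff_eq] at hj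
      simp only [decide_eq_true_eq]
      rw [getD_buildA c l2 j hjm]
      exact hj.symm
    rw [List.countP_eq_length.mpr hall', List.length_range]

lemma row_eq (l1 l2 : List Char) (d : Nat) :
    (if (l2.length - 1) * d < l1.length then
       ((List.range (l1.length - (l2.length - 1) * d)).map
         (fun si => if chkB l1 l2 si d then (1 : Int) else 0)).sum
     else 0)
    = ((List.range l1.length).map (fun si => gIf l1 l2 si d)).sum := by
  by_cases hg : (l2.length - 1) * d < l1.length
  · rw [if_pos hg]
    rw [show l1.length = (l1.length - (l2.length - 1) * d) + (l2.length - 1) * d by omega,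
      List.range_add, List.map_append, List.sum_append]
    have h2 : ((((List.range ((l2.length - 1) * d)).map
        (fun k => l1.length - (l2.length - 1) * d + k)).map (fun si => gIf l1 l2 si d))).sum = 0 := by
      apply List.sum_eq_zero
      intro x hx
      simp only [List.map_map, List.mem_map, Function.comp] at hx
      obtain ⟨k, _, rfl⟩ := hx
      unfold gIf
      rw [if_neg (by omega)]
    rw [h2, add_zero]
    simp only [Nat.add_sub_cancel]
    apply congrArg
    apply List.map_congr_left
    intro si hsi
    rw [List.mem_range] at hsi
    have hcan := Nat.sub_add_cancel (le_of_lt hg)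
    have hguard : si + (l2.length - 1) * d < l1.length := by omega
    unfold gIf
    rw [if_pos hguard]
  · rw [if_neg hg]
    symm
    apply List.sum_eq_zero
    intro x hx
    simp only [List.mem_map] at hx
    obtain ⟨si, _, rfl⟩ := hx
    unfold gIf
    rw [if_neg (by omega)]

lemma loopA_sum (l1 l2 : List Char) (hm : 2 ≤ l2.length) :
    ∀ (fuel c : Nat) (acc : Int),
      loopA l1 l2 c fuel acc =
        acc + ((List.range fuel).map
          (fun t => ((List.range l1.length).map (fun si => gIf l1 l2 si (c + t + 1))).sum)).sum := by
  have hne : l2 ≠ [] := by intro h; rw [h] at hm; simp at hm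
  intro fuel
  induction fuel with
  | zero => intro c acc; simp [loopA]
  | succ fuel ih =>
    intro c acc
    rw [loopA]
    have hlen : (buildA c l2).length = (l2.length - 1) * (c + 1) + 1 := length_buildA c l2 hne
    by_cases hg : (buildA c l2).length > l1.length
    · rw [if_pos hg]
      have hz : ∀ t ∈ List.range (fuel + 1),
          ((List.range l1.length).map (fun si => gIf l1 l2 si (c + t + 1))).sum = 0 := by
        intro t _
        apply List.sum_eq_zero
        intro x hx
        simp only [List.mem_map] at hx
        obtain ⟨si, _, rfl⟩ := hx
        unfold gIf
        have hmono := Nat.mul_le_mul_left (l2.length - 1) (show c + 1 ≤ c + t + 1 by omega)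
        rw [if_neg (by omega)]
      have hz2 : ((List.range (fuel + 1)).map
          (fun t => ((List.range l1.length).map (fun si => gIf l1 l2 si (c + t + 1))).sum)).sum = 0 := by
        apply List.sum_eq_zero
        intro x hx
        simp only [List.mem_map] at hx
        obtain ⟨t, ht, rfl⟩ := hx
        exact hz t ht
      rw [hz2]
      omega
    · rw [if_neg hg]
      rw [not_lt] at hg
      have hfold : (List.range (l1.length - (buildA c l2).length + 1)).foldl
          (fun a si => a + innerA l1 (buildA c l2) l2.length si c 0 0) acc
          = acc + ((List.range (l1.length - (l2.length - 1) * (c + 1))).map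
              (fun si => if chkB l1 l2 si (c + 1) then (1 : Int) else 0)).sum := by
        rw [PySem.List.foldl_add]
        congr 1
        rw [show l1.length - (buildA c l2).length + 1 = l1.length - (l2.length - 1) * (c + 1) by omega]
        apply congrArg
        apply List.map_congr_left
        intro si hsi
        rw [List.mem_range] at hsi
        have hcan := Nat.sub_add_cancel (show (l2.length - 1) * (c + 1) ≤ l1.length by omega)
        exact innerA_chk l1 l2 si c hm (by omega)
      rw [ih, hfold]
      have hrow := row_eq l1 l2 (c + 1)
      rw [if_pos (by omega)] at hrow
      rw [List.range_succ_eq_map, List.map_cons, List.sum_cons, List.map_map]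
      have hmap : ∀ t ∈ List.range fuel,
          ((fun t => ((List.range l1.length).map (fun si => gIf l1 l2 si (c + t + 1))).sum) ∘ Nat.succ) t
          = ((List.range l1.length).map (fun si => gIf l1 l2 si (c + 1 + t + 1))).sum := by
        intro t _
        simp only [Function.comp]
        apply congrArg
        apply List.map_congr_left
        intro si _
        exact congrArg (gIf l1 l2 si) (by omega)
      rw [List.map_congr_left hmap, hrow]
      ring

-- ===== B-side lemmas =====

-- the ceiling-count bracket: position q exists in line1[r::d] iff its start index is < n
lemma cnt_bracket (n r d q : Nat) (hd : 0 < d) :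
    q < (n - r + d - 1) / d ↔ r + d * q < n := by
  rw [show q < (n - r + d - 1) / d ↔ q + 1 ≤ (n - r + d - 1) / d by omega,
    Nat.le_div_iff_mul_le hd, add_mul, one_mul, mul_comm d q]
  have h0 : 0 ≤ q * d := Nat.zero_le _
  generalize q * d = x
  omega

-- residue string line1[r::d] as an explicit map over indices r, r+d, r+2d, …
lemma resB_eq (l1 : List Char) (r d : Nat) (hd : 0 < d) :
    resB l1 r d =
      (List.range ((l1.length - r + d - 1) / d)).map (fun k => l1.getD (r + d * k) ' ') := by
  unfold resB
  have hd0 : ¬ ((d:Int) = 0) := by exact_mod_cast hd.ne'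
  have hdneg : ¬ ((d:Int) < 0) := by omega
  have hrneg : ¬ ((r:Int) < 0) := by omega
  have hdpos : (0:Int) < (d:Int) := by exact_mod_cast hd
  simp only [PySem.List.slice?, PySem.List.sliceIndices, if_neg hd0, if_neg hdneg,
    if_neg hrneg, if_pos hdpos]
  by_cases hr : r < l1.length
  · have hmin : min (r:Int) (l1.length:Int) = (r:Int) := by omega
    rw [hmin, if_pos (by exact_mod_cast hr)]
    have hcast : ((l1.length:Int) - r + d - 1) = ((l1.length - r + d - 1 : Nat) : Int) := by omega
    rw [hcast, show ((l1.length - r + d - 1 : Nat) : Int) / (d:Int) = (((l1.length - r + d - 1) / d : Nat) : Int) from by push_cast; ring, Int.toNat_natCast]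
    rw [Option.getD_some]
    rw [List.filterMap_congr (g := fun x => some (l1.getD (r + d * x) ' ')) ?_]
    · show List.filterMap (some ∘ fun x => l1.getD (r + d * x) ' ') _ = _
      rw [List.filterMap_eq_map]
    · intro x hx
      rw [List.mem_range] at hx
      have hin : r + d * x < l1.length := (cnt_bracket l1.length r d x hd).mp hx
      have hidx : ((r:Int) + (d:Int) * (x:Int)).toNat = r + d * x := by omega
      simp only [hidx, List.getElem?_eq_getElem hin, List.getD_eq_getElem _ _ hin]
  · have hmin : min (r:Int) (l1.length:Int) = (l1.length:Int) := by omega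
    rw [hmin, if_neg (by omega)]
    have : (l1.length - r + d - 1) / d = 0 := by
      apply Nat.div_eq_of_lt; omega
    simp [this]

-- l2 is a prefix of line1[r::d] dropped at q  ↔  the strided window at si = r + d*q matches
lemma prefix_resB (l1 l2 : List Char) (r d q : Nat) (hd : 0 < d) (hm : 1 ≤ l2.length)
    (hq : q < (l1.length - r + d - 1) / d) :
    l2 <+: (resB l1 r d).drop q ↔
      (r + d * q + (l2.length - 1) * d < l1.length ∧ chkB l1 l2 (r + d * q) d = true) := by
  have hdrop : (resB l1 r d).drop q
      = (List.range' q ((l1.length - r + d - 1) / d - q)).map (fun k => l1.getD (r + d * k) ' ') := by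
    rw [resB_eq l1 r d hd, ← List.map_drop, List.range_eq_range', List.drop_range']
    simp
  rw [hdrop, List.prefix_iff_getElem]
  have hglen : ((List.range' q ((l1.length - r + d - 1) / d - q)).map
      (fun k => l1.getD (r + d * k) ' ')).length = (l1.length - r + d - 1) / d - q := by
    simp
  constructor
  · rintro ⟨hle, hval⟩
    rw [hglen] at hle
    have hlt : q + (l2.length - 1) < (l1.length - r + d - 1) / d := by omega
    have hg := (cnt_bracket l1.length r d (q + (l2.length - 1)) hd).mp hlt
    rw [Nat.mul_add] at hg
    constructor
    · rw [mul_comm (l2.length - 1) d]; omega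
    · unfold chkB
      rw [List.all_eq_true]
      intro j hjm
      rw [List.mem_range] at hjm
      have hv := hval j hjm
      rw [List.getElem_map, List.getElem_range'] at hv
      rw [beq_iff_eq, show r + d * q + j * d = r + d * (q + 1 * j) from by ring,
        List.getD_eq_getElem l2 ' ' hjm]
      exact hv.symm
  · rintro ⟨hguard, hchk⟩
    unfold chkB at hchk
    rw [List.all_eq_true] at hchk
    have hlt : q + (l2.length - 1) < (l1.length - r + d - 1) / d := by
      rw [cnt_bracket _ _ _ _ hd, Nat.mul_add]
      rw [mul_comm (l2.length - 1) d] at hguard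
      omega
    refine ⟨by rw [hglen]; omega, ?_⟩
    intro j hjm
    have hj := hchk j (List.mem_range.mpr hjm)
    rw [beq_iff_eq] at hj
    rw [List.getElem_map, List.getElem_range']
    rw [show r + d * q + j * d = r + d * (q + 1 * j) from by ring,
      List.getD_eq_getElem l2 ' ' hjm] at hj
    exact hj.symm

-- the find loop counts exactly the positions ≥ k at which l2 is a prefix
lemma findLoop_count (t p : List Char) (hp : p ≠ []) :
    ∀ (fuel k : Nat) (acc : Int), k ≤ t.length → t.length - k < fuel →
      findLoopB t p fuel (PySem.Chars.findFrom t p (k : Int)) acc =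
        acc + (((List.range' k (t.length - k)).countP (fun q => decide (p <+: t.drop q))) : Int) := by
  intro fuel
  induction fuel with
  | zero => intro k acc hk hf; omega
  | succ fuel ih =>
    intro k acc hk hf
    by_cases hneg : PySem.Chars.findFrom t p (k:Int) = -1
    · rw [hneg, findLoopB, if_pos rfl]
      have hni : ¬ p <:+: t.drop k := (PySem.Chars.findFrom_natCast_eq_neg_one_iff t p k hk).mp hneg
      have hz : (List.range' k (t.length - k)).countP (fun q => decide (p <+: t.drop q)) = 0 := by
        rw [List.countP_eq_zero]
        intro j hj
        rw [List.mem_range'_1] at hj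
        simp only [decide_eq_true_eq]
        intro hpre
        refine hni ?_
        have hdj : t.drop j = (t.drop k).drop (j - k) := by
          rw [List.drop_drop]; congr 1; omega
        rw [hdj] at hpre
        exact hpre.isInfix.trans (List.drop_suffix _ _).isInfix
      rw [hz]; simp
    · obtain ⟨hkle, hpre, hmin⟩ := PySem.Chars.findFrom_natCast_spec t p k hk hneg
      set q := PySem.Chars.findFrom t p (k:Int) with hq
      have hq0 : (0:Int) ≤ q := le_trans (by exact_mod_cast Nat.zero_le k) hkle
      have hqlt : q.toNat < t.length := by
        have hne := hpre.ne_nil hp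
        by_contra hge
        exact hne (List.drop_eq_nil_iff.mpr (by omega))
      have hkq : k ≤ q.toNat := by omega
      rw [findLoopB, if_neg hneg]
      have hq1 : q + 1 = ((q.toNat + 1 : Nat) : Int) := by omega
      rw [hq1, ih (q.toNat + 1) (acc + 1) (by omega) (by omega)]
      have hlen : t.length - k = (q.toNat - k) + ((t.length - q.toNat - 1) + 1) := by omega
      have hsplit : List.range' k (t.length - k)
          = List.range' k (q.toNat - k) ++ (q.toNat :: List.range' (q.toNat + 1) (t.length - q.toNat - 1)) := by
        rw [hlen, ← List.range'_succ, ← List.range'_append_1]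
        congr 2
        omega
      rw [hsplit, List.countP_append, List.countP_cons]
      have h1 : (List.range' k (q.toNat - k)).countP (fun j => decide (p <+: t.drop j)) = 0 := by
        rw [List.countP_eq_zero]
        intro j hj
        rw [List.mem_range'_1] at hj
        simp only [decide_eq_true_eq]
        exact hmin j hj.1 (by omega)
      rw [h1, decide_eq_true hpre,
        show t.length - (q.toNat + 1) = t.length - q.toNat - 1 from by omega]
      rw [if_pos rfl]
      push_cast
      ring

-- one residue class contributes the gIf-sum over its start positions
lemma occB_eq (l1 l2 : List Char) (r d : Nat) (hd : 0 < d) (hm : 2 ≤ l2.length) (a : Int) :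
    findLoopB (resB l1 r d) l2 ((resB l1 r d).length + 1) (PySem.Chars.find (resB l1 r d) l2) a =
      a + ((List.range ((l1.length - r + d - 1) / d)).map
            (fun q => gIf l1 l2 (r + d * q) d)).sum := by
  have hp : l2 ≠ [] := by intro h; rw [h] at hm; simp at hm
  have hlen : (resB l1 r d).length = (l1.length - r + d - 1) / d := by
    rw [resB_eq l1 r d hd]; simp
  have h := findLoop_count (resB l1 r d) l2 hp ((resB l1 r d).length + 1) 0 a (by omega) (by omega)
  rw [Nat.cast_zero, PySem.Chars.findFrom_zero] at h
  rw [h]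
  congr 1
  rw [Nat.sub_zero, ← List.range_eq_range', ← PySem.List.sum_map_ite_one_zero, hlen]
  apply congrArg
  apply List.map_congr_left
  intro q hqm
  rw [List.mem_range] at hqm
  by_cases hpre : l2 <+: (resB l1 r d).drop q
  · rw [if_pos (by exact decide_eq_true hpre)]
    have := (prefix_resB l1 l2 r d q hd (by omega) hqm).mp hpre
    unfold gIf
    rw [if_pos this.1, if_pos this.2]
  · rw [if_neg (by simpa using hpre)]
    have hni := fun hg hc => hpre ((prefix_resB l1 l2 r d q hd (by omega) hqm).mpr ⟨hg, hc⟩)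
    unfold gIf
    split_ifs with h1 h2
    · exact absurd h2 (fun hc => hni h1 hc)
    · rfl
    · rfl

lemma list_sum_range (n : Nat) (f : Nat → Int) :
    ((List.range n).map f).sum = ∑ i ∈ Finset.range n, f i := by
  induction n with
  | zero => simp
  | succ k ih => rw [List.range_succ]; simp [Finset.sum_range_succ, ih]

-- summing over residue classes r < d and positions within each is summing over all starts < n
lemma reindex_sum (n d : Nat) (hd : 0 < d) (f : Nat → Int) :
    ((List.range d).map (fun r =>
      ((List.range ((n - r + d - 1) / d)).map (fun q => f (r + d * q))).sum)).sum
    = ((List.range n).map f).sum := by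
  simp only [list_sum_range]
  rw [Finset.sum_sigma' (Finset.range d) (fun r => Finset.range ((n - r + d - 1) / d))
    (fun r q => f (r + d * q))]
  refine Finset.sum_nbij' (fun x => x.1 + d * x.2) (fun si => ⟨si % d, si / d⟩) ?_ ?_ ?_ ?_ ?_
  · rintro ⟨r, q⟩ hx
    rw [Finset.mem_sigma, Finset.mem_range, Finset.mem_range] at hx
    rw [Finset.mem_range]
    exact (cnt_bracket n r d q hd).mp hx.2
  · intro si hsi
    rw [Finset.mem_range] at hsi
    rw [Finset.mem_sigma, Finset.mem_range, Finset.mem_range]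
    refine ⟨Nat.mod_lt _ hd, ?_⟩
    rw [cnt_bracket _ _ _ _ hd, Nat.mod_add_div]
    exact hsi
  · rintro ⟨r, q⟩ hx
    rw [Finset.mem_sigma, Finset.mem_range, Finset.mem_range] at hx
    have h1 : (r + d * q) % d = r := by
      rw [Nat.add_mul_mod_self_left, Nat.mod_eq_of_lt hx.1]
    have h2 : (r + d * q) / d = q := by
      rw [Nat.add_mul_div_left _ _ hd, Nat.div_eq_of_lt hx.1]; omega
    refine Sigma.ext h1 ?_
    simp only [h2]
    exact HEq.rfl
  · intro si _
    exact Nat.mod_add_div si d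
  · rintro ⟨r, q⟩ _
    rfl

lemma rowB_eq (l1 l2 : List Char) (d : Nat) (hd : 0 < d) (hm : 2 ≤ l2.length) (acc : Int) :
    rowB l1 l2 d acc = acc + ((List.range l1.length).map (fun si => gIf l1 l2 si d)).sum := by
  unfold rowB
  have hfg : (fun (a : Int) r =>
      findLoopB (resB l1 r d) l2 ((resB l1 r d).length + 1) (PySem.Chars.find (resB l1 r d) l2) a)
      = fun (a : Int) r => a + ((List.range ((l1.length - r + d - 1) / d)).map
          (fun q => gIf l1 l2 (r + d * q) d)).sum := by
    funext a r
    exact occB_eq l1 l2 r d hd hm a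
  rw [hfg, PySem.List.foldl_add, reindex_sum l1.length d hd (fun si => gIf l1 l2 si d)]

lemma loopB_sum (l1 l2 : List Char) (hm : 2 ≤ l2.length) :
    ∀ (fuel d : Nat) (acc : Int), 1 ≤ d →
      loopB l1 l2 d fuel acc =
        acc + ((List.range fuel).map
          (fun t => ((List.range l1.length).map (fun si => gIf l1 l2 si (d + t))).sum)).sum := by
  intro fuel
  induction fuel with
  | zero => intro d acc _; simp [loopB]
  | succ fuel ih =>
    intro d acc hd
    rw [loopB]
    by_cases hg : (l2.length - 1) * d + 1 ≤ l1.length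
    · rw [if_pos hg, ih (d + 1) _ (by omega), rowB_eq l1 l2 d (by omega) hm acc]
      rw [List.range_succ_eq_map, List.map_cons, List.sum_cons, List.map_map]
      have hmap : ∀ t ∈ List.range fuel,
          ((fun t => ((List.range l1.length).map (fun si => gIf l1 l2 si (d + t))).sum) ∘ Nat.succ) t
          = ((List.range l1.length).map (fun si => gIf l1 l2 si (d + 1 + t))).sum := by
        intro t _
        simp only [Function.comp]
        apply congrArg
        apply List.map_congr_left
        intro si _
        exact congrArg (gIf l1 l2 si) (by omega)
      rw [List.map_congr_left hmap]
      simp only [Nat.add_zero]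
      ring
    · rw [if_neg hg]
      have hz2 : ((List.range (fuel + 1)).map
          (fun t => ((List.range l1.length).map (fun si => gIf l1 l2 si (d + t))).sum)).sum = 0 := by
        apply List.sum_eq_zero
        intro x hx
        simp only [List.mem_map] at hx
        obtain ⟨t, _, rfl⟩ := hx
        apply List.sum_eq_zero
        intro y hy
        simp only [List.mem_map] at hy
        obtain ⟨si, _, rfl⟩ := hy
        unfold gIf
        have hmono := Nat.mul_le_mul_left (l2.length - 1) (show d ≤ d + t by omega)
        rw [if_neg (by omega)]
      rw [hz2, add_zero]

-- ===== VERDICT (by name: the statement is the Claim_ definition above) =====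
theorem solution_spec : Claim_equal_solution := by
  intro line1 line2 _hdom hpre
  unfold Spec_solution solution solution_alt
  rcases hpre with hm | ⟨hm1, hn0⟩
  · rw [if_pos hm, loopA_sum line1.toList line2.toList hm,
      loopB_sum line1.toList line2.toList hm _ 2 _ (by omega)]
    congr 1
    apply congrArg
    apply List.map_congr_left
    intro t _
    apply congrArg
    apply List.map_congr_left
    intro si _
    exact congrArg (gIf line1.toList line2.toList si) (by omega)
  · rw [if_neg (by omega)]
    have hl1 : line1.toList = [] := List.length_eq_zero_iff.mp hn0
    rw [hl1]
    obtain ⟨a, hl2⟩ := List.length_eq_one_iff.mp hm1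
    rw [hl2]
    simp [loopA, buildA]
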